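-- pv_equiv track=rewrite | github.com/CelsoHacker/NeuroROM-AI | smw_charset_reverse_engineer.py | merge_charsets
-- ===== SOURCE A (Python) =====
-- from typing import Dict, List, Tuple
--
-- def merge_charsets(charsets: List[Dict[int, str]]) -> Dict[int, str]:
--     """Mescla múltiplos charsets encontrados, verificando consistência."""
--     merged = {}
--     conflicts = []
--
--     for charset in charsets:
--         for byte_val, char in charset.items():
--             if byte_val in merged:
--                 if merged[byte_val] != char:
--                     conflicts.append(f"0x{byte_val:02X}: '{merged[byte_val]}' vs '{char}'")
--             else:
--                 merged[byte_val] = char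
--
--     return merged, conflicts
-- ===== SOURCE B (Python) =====
-- def merge_charsets(charsets):
--     """Two-pass rewrite: build the first-wins merged table once, then detect conflicts."""
--     entries = [(b, c) for cs in charsets for b, c in cs.items()]
--     merged = {}
--     for b, c in entries:
--         merged.setdefault(b, c)
--     conflicts = [f"0x{b:02X}: '{merged[b]}' vs '{c}'" for b, c in entries if c != merged[b]]
--     return merged, conflicts
-- ===== Notes on version B (the rewrite author's own statement) =====
-- stated objective: alternative
-- what changed: A interleaves merging and conflict detection in one pass over a running dict; B first builds the complete first-wins merged table, then a separate comprehension over the flattened entries collects conflicts against the finished table.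
import Mathlib
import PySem

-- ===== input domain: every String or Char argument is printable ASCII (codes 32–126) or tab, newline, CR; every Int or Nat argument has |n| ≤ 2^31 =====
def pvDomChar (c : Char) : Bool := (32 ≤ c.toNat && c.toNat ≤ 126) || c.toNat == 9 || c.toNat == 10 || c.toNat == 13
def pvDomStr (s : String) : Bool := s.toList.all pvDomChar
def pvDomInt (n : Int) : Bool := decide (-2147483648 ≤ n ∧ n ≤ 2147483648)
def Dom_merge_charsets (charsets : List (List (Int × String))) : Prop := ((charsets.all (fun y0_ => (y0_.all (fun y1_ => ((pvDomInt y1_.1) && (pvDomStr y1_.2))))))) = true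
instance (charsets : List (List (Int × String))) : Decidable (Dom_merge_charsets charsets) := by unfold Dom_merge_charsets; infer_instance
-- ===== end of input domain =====

-- B separates the merge (first-wins table) from conflict detection (second pass over all
-- entries against the finished table); objective: alternative decomposition, same cost.

-- ===== PORT A =====
-- shared string helper for f"0x{b:02X}: '{old}' vs '{new}'"
def hexDigit (d : Nat) : Char := if d < 10 then Char.ofNat (48 + d) else Char.ofNat (55 + d)

def hexChars : Nat → List Char → List Char
  | 0, acc => acc
  | (n+1), acc => hexChars ((n+1) / 16) (hexDigit ((n+1) % 16) :: acc)
  decreasing_by exact Nat.div_lt_self (Nat.succ_pos n) (by norm_num)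

-- f"{b:02X}": uppercase hex of |b|, '-' in front for negatives, zero-padded to width 2 (sign first) — PySem.Chars.zfill is Python's pad rule
def fmt02X (b : Int) : List Char :=
  let ds := if b.natAbs = 0 then ['0'] else hexChars b.natAbs []
  PySem.Chars.zfill ((if b < 0 then ['-'] else []) ++ ds) 2

def conflictStr (b : Int) (old new_ : String) : String :=
  String.ofList ("0x".toList ++ fmt02X b ++ ": '".toList ++ old.toList ++ "' vs '".toList ++ new_.toList ++ ['\''])

-- A's loop body: check membership, record a conflict against the running dict or insert
def stepA (st : PySem.Dict Int String × List String) (bc : Int × String) :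
    PySem.Dict Int String × List String :=
  match st.1.get? bc.1 with
  | some v => if v ≠ bc.2 then (st.1, st.2 ++ [conflictStr bc.1 v bc.2]) else st
  | none => (st.1.insert bc.1 bc.2, st.2)

def merge_charsets (charsets : List (List (Int × String))) : (List (Int × String)) × List String :=
  let st := charsets.foldl (fun st charset => charset.foldl stepA st)
    ((PySem.Dict.empty : PySem.Dict Int String), ([] : List String))
  (st.1.items, st.2)

-- ===== PORT B =====
-- merged.setdefault(b, c)
def stepM (d : PySem.Dict Int String) (bc : Int × String) : PySem.Dict Int String :=
  d.setdefault bc.1 bc.2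

-- the conflict comprehension's filter+format, against the finished table
def conflict? (merged : PySem.Dict Int String) (bc : Int × String) : Option String :=
  match merged.get? bc.1 with
  | some v => if v ≠ bc.2 then some (conflictStr bc.1 v bc.2) else none
  | none => none

def merge_charsets_alt (charsets : List (List (Int × String))) : (List (Int × String)) × List String :=
  let entries := charsets.flatten
  let merged := entries.foldl stepM PySem.Dict.empty
  let conflicts := entries.filterMap (conflict? merged)
  (merged.items, conflicts)

-- ===== PRECONDITION & SPEC =====
def Spec_merge_charsets (charsets : List (List (Int × String))) (out : (List (Int × String)) × List String) : Prop := out = merge_charsets_alt charsets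
instance (charsets : List (List (Int × String))) (out : (List (Int × String)) × List String) : Decidable (Spec_merge_charsets charsets out) := by unfold Spec_merge_charsets; infer_instance

-- ===== CLAIM (what is proved, stated in full; the proofs are below) =====
def Claim_equal_merge_charsets : Prop := ∀ (charsets : List (List (Int × String))), Dom_merge_charsets charsets → Spec_merge_charsets charsets (merge_charsets charsets)

-- ===== LEMMAS AND PROOFS =====

-- A's one step, written as B's two ingredients: setdefault plus the conflict of the entry
-- against the current table
lemma stepA_eq (d : PySem.Dict Int String) (acc : List String) (e : Int × String) :
    stepA (d, acc) e = (stepM d e, acc ++ (conflict? d e).toList) := by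
  unfold stepA stepM conflict?
  rcases h : d.get? e.1 with _ | v
  · rw [PySem.Dict.setdefault_of_not_contains _ _
          (by rw [PySem.Dict.contains_eq_isSome_get?, h]; rfl)]
    simp [h]
  · rw [PySem.Dict.setdefault_of_contains _ _
          (by rw [PySem.Dict.contains_eq_isSome_get?, h]; rfl)]
    by_cases hv : v = e.2 <;> simp [h, hv]

-- setdefault only grows the table: an existing binding survives the whole merge loop
lemma get?_foldl_stepM_of_some (entries : List (Int × String)) (d : PySem.Dict Int String)
    (k : Int) (v : String) (h : d.get? k = some v) :
    (entries.foldl stepM d).get? k = some v := by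
  induction entries generalizing d with
  | nil => simpa using h
  | cons e rest ih =>
      apply ih
      unfold stepM
      by_cases hk : e.1 = k
      · subst hk
        rw [PySem.Dict.get?_setdefault_self, h]
        rfl
      · rw [PySem.Dict.get?_setdefault_of_ne d e.2 (Ne.symm hk)]
        exact h

-- the conflict of an entry is the same against the current table and the finished one
lemma conflict?_stable (rest : List (Int × String)) (d : PySem.Dict Int String)
    (e : Int × String) :
    conflict? (rest.foldl stepM (stepM d e)) e = conflict? d e := by
  rcases h : d.get? e.1 with _ | v
  · have h1 : (stepM d e).get? e.1 = some e.2 := by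
      unfold stepM; rw [PySem.Dict.get?_setdefault_self, h]; rfl
    unfold conflict?
    rw [get?_foldl_stepM_of_some rest _ _ _ h1, h]
    simp
  · have h1 : (stepM d e).get? e.1 = some v := by
      unfold stepM; rw [PySem.Dict.get?_setdefault_self, h]; rfl
    unfold conflict?
    rw [get?_foldl_stepM_of_some rest _ _ _ h1, h]

-- main invariant: the interleaved pass equals merge-then-detect
lemma loop_eq (entries : List (Int × String)) (d : PySem.Dict Int String) (acc : List String) :
    entries.foldl stepA (d, acc)
      = (entries.foldl stepM d,
         acc ++ entries.filterMap (conflict? (entries.foldl stepM d))) := by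
  induction entries generalizing d acc with
  | nil => simp
  | cons e rest ih =>
      rw [List.foldl_cons, stepA_eq, ih, List.foldl_cons, List.filterMap_cons,
        conflict?_stable]
      cases conflict? d e <;> simp

-- ===== VERDICT (by name: the statement is the Claim_ definition above) =====
theorem merge_charsets_spec : Claim_equal_merge_charsets := by
  intro charsets _
  unfold Spec_merge_charsets merge_charsets merge_charsets_alt
  rw [← List.foldl_flatten, loop_eq]
  simp
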